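-- pv_equiv track=rewrite | github.com/pypi-data/pypi-mirror-147 | packages/mnapy/mnapy-1.2.25.tar.gz/mnapy-1.2.25/mnapy/Utils.py | FixDictionary
-- ===== SOURCE A (Python) =====
-- def FixDictionary(Dictionary):
--     Properties = [Dictionary]
--     ModifiedProperties = [
--         {
--             k.replace(" ", "_")
--             .replace("'", "_")
--             .replace("/", "_")
--             .replace("!", "N_"): v
--             for k, v in d.items()
--         }
--         for d in Properties
--     ][0]
--     return ModifiedProperties
-- ===== SOURCE B (Python) =====
-- REPL = {" ": "_", "'": "_", "/": "_", "!": "N_"}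
--
-- def FixDictionary(Dictionary):
--     result = {}
--     for k, v in Dictionary.items():
--         pieces = []
--         i = 0
--         n = len(k)
--         while i < n:
--             j = i
--             while j < n and k[j] not in REPL:
--                 j += 1
--             pieces.append(k[i:j])
--             if j < n:
--                 pieces.append(REPL[k[j]])
--                 j += 1
--             i = j
--         result["".join(pieces)] = v
--     return result
-- ===== Notes on version B (the rewrite author's own statement) =====
-- stated objective: alternative
-- what changed: B drops A's list-of-one comprehension and chained whole-string .replace passes: it builds the result dict in one explicit loop and rewrites each key with a two-pointer segment scan that copies maximal runs of untouched characters in bulk and splices in the replacement at each special character, so each key is scanned once instead of four times.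
import Mathlib
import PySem

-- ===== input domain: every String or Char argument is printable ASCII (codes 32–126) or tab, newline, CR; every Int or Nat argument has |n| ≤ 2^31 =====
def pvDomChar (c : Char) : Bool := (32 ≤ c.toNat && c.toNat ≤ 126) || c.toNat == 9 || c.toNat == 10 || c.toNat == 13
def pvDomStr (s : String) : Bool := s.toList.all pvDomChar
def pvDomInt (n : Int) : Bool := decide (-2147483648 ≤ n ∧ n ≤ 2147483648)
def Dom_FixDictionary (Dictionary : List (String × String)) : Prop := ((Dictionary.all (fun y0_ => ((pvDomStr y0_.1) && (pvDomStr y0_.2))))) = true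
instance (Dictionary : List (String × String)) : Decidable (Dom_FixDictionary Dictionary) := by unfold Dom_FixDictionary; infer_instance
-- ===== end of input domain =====

-- B builds the result dict in one explicit loop and rewrites each key with a single
-- two-pointer segment scan (copy untouched runs in bulk, splice the replacement at each
-- special char) instead of A's four chained whole-string .replace passes inside a
-- list-of-one comprehension.

-- ===== PORT A =====
-- the four chained .replace calls on a key
def pvFixKeyA (k : String) : String :=
  PySem.Str.replace (PySem.Str.replace (PySem.Str.replace (PySem.Str.replace k " " "_") "'" "_") "/" "_") "!" "N_"

def FixDictionary (Dictionary : List (String × String)) : List (String × String) :=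
  let Properties : List (List (String × String)) := [Dictionary]
  let ModifiedProperties : List (String × String) :=
    (Properties.map (fun d =>
      (d.foldl (fun acc kv => acc.insert (pvFixKeyA kv.1) kv.2)
        (PySem.Dict.empty : PySem.Dict String String)).items)).headI
  ModifiedProperties

-- ===== PORT B =====
-- `c in REPL`: membership in the key set of Source B's REPL table
def pvSpecial (c : Char) : Bool := c = ' ' || c = '\'' || c = '/' || c = '!'

-- REPL[c] for a special character c
def pvRepl (c : Char) : List Char := if c = '!' then ['N', '_'] else ['_']

-- Source B's inner two-pointer scan: the inner `while` advancing j over non-REPL characters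
-- and the slice k[i:j] are exactly takeWhile/dropWhile of the remaining suffix; each
-- recursive step consumes the untouched run plus one special character (exact port).
def pvFixKeyChars (cs : List Char) : List Char :=
  match h : cs.dropWhile (fun c => !pvSpecial c) with
  | [] => cs.takeWhile (fun c => !pvSpecial c)
  | c :: t => cs.takeWhile (fun c => !pvSpecial c) ++ pvRepl c ++ pvFixKeyChars t
termination_by cs.length
decreasing_by
  have hle := List.length_dropWhile_le (p := fun c => !pvSpecial c) (l := cs)
  rw [h] at hle
  simp at hle
  omega

def pvFixKeyB (k : String) : String := String.ofList (pvFixKeyChars k.toList)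

def FixDictionary_alt (Dictionary : List (String × String)) : List (String × String) :=
  (Dictionary.foldl (fun acc kv => acc.insert (pvFixKeyB kv.1) kv.2)
    (PySem.Dict.empty : PySem.Dict String String)).items

-- ===== PRECONDITION & SPEC =====
def Spec_FixDictionary (Dictionary : List (String × String)) (out : List (String × String)) : Prop := out = FixDictionary_alt Dictionary
instance (Dictionary : List (String × String)) (out : List (String × String)) : Decidable (Spec_FixDictionary Dictionary out) := by unfold Spec_FixDictionary; infer_instance

-- ===== CLAIM (what is proved, stated in full; the proofs are below) =====
def Claim_equal_FixDictionary : Prop := ∀ (Dictionary : List (String × String)), Dom_FixDictionary Dictionary → Spec_FixDictionary Dictionary (FixDictionary Dictionary)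

-- ===== LEMMAS AND PROOFS =====

-- common reference point for both key transformations: the per-character substitution
def pvTrChar (c : Char) : List Char := if pvSpecial c then pvRepl c else [c]

-- replace with a single-character needle is a per-character flatMap
lemma replace_go_single (a : Char) (new : List Char) :
    ∀ (s : List Char) (fuel : Nat) (acc : List Char), s.length ≤ fuel →
      PySem.Chars.replace.go [a] new fuel s acc
        = acc.reverse ++ s.flatMap (fun c => if c = a then new else [c]) := by
  intro s
  induction s with
  | nil =>
    intro fuel acc _
    cases fuel <;> simp [PySem.Chars.replace.go]
  | cons c t ih =>
    intro fuel acc hle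
    cases fuel with
    | zero => simp at hle
    | succ f =>
      by_cases hca : a = c
      · subst hca
        have hpre : [a].isPrefixOf (a :: t) = true := by simp [List.isPrefixOf]
        rw [PySem.Chars.replace.go, if_pos hpre]
        have hdrop : List.drop [a].length (a :: t) = t := by simp
        rw [hdrop]
        simp only [List.length_cons] at hle
        rw [ih f (new.reverse ++ acc) (by omega)]
        simp
      · have hpre : [a].isPrefixOf (c :: t) = false := by
          simp [List.isPrefixOf]; exact hca
        rw [PySem.Chars.replace.go, if_neg (by simp [hpre])]
        simp only [List.length_cons] at hle
        rw [ih f (c :: acc) (by omega)]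
        simp [Ne.symm hca]

lemma replace_single (s : List Char) (a : Char) (new : List Char) :
    PySem.Chars.replace s [a] new = s.flatMap (fun c => if c = a then new else [c]) := by
  rw [PySem.Chars.replace, if_neg (by simp)]
  simpa using replace_go_single a new s s.length [] le_rfl

-- A's four chained replaces equal the per-character flatMap
lemma fixKeyA_eq (k : String) :
    pvFixKeyA k = String.ofList (k.toList.flatMap pvTrChar) := by
  unfold pvFixKeyA PySem.Str.replace
  simp only [String.toList_ofList,
    show " ".toList = [' '] from rfl, show "_".toList = ['_'] from rfl,
    show "'".toList = ['\''] from rfl, show "/".toList = ['/'] from rfl,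
    show "!".toList = ['!'] from rfl, show "N_".toList = ['N', '_'] from rfl,
    replace_single, List.flatMap_assoc]
  congr 1
  induction k.toList with
  | nil => rfl
  | cons c t ih =>
    simp only [List.flatMap_cons]
    rw [ih]
    congr 1
    unfold pvTrChar pvRepl pvSpecial
    by_cases h1 : c = ' ' <;> by_cases h2 : c = '\'' <;> by_cases h3 : c = '/' <;>
      by_cases h4 : c = '!' <;> simp_all

-- a run of non-special characters is left unchanged by the per-character flatMap
lemma flatMap_nonspecial (l : List Char) (h : ∀ c ∈ l, pvSpecial c = false) :
    l.flatMap pvTrChar = l := by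
  induction l with
  | nil => rfl
  | cons c t ih =>
    simp only [List.flatMap_cons]
    rw [pvTrChar, h c (by simp), ih (fun c hc => h c (by simp [hc]))]
    simp

-- unfolding equations of the segment scan, conditioned on the dropWhile split
lemma fixKeyChars_nil (cs : List Char) (h : cs.dropWhile (fun c => !pvSpecial c) = []) :
    pvFixKeyChars cs = cs.takeWhile (fun c => !pvSpecial c) := by
  rw [pvFixKeyChars]
  split
  · rfl
  · simp_all

lemma fixKeyChars_cons (cs : List Char) (c : Char) (t : List Char)
    (h : cs.dropWhile (fun c => !pvSpecial c) = c :: t) :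
    pvFixKeyChars cs = cs.takeWhile (fun c => !pvSpecial c) ++ pvRepl c ++ pvFixKeyChars t := by
  rw [pvFixKeyChars]
  split
  · simp_all
  · simp_all

-- B's segment scan equals the per-character flatMap
lemma fixKeyChars_eq (cs : List Char) : pvFixKeyChars cs = cs.flatMap pvTrChar := by
  induction cs using pvFixKeyChars.induct with
  | case1 cs h =>
    rw [fixKeyChars_nil cs h]
    have hall : ∀ c ∈ cs, pvSpecial c = false := by
      intro c hc
      have := List.dropWhile_eq_nil_iff.mp h c hc
      simpa using this
    rw [List.takeWhile_eq_self_iff.mpr (by intro c hc; simp [hall c hc]),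
      flatMap_nonspecial cs hall]
  | case2 cs c t h ih =>
    rw [fixKeyChars_cons cs c t h]
    have hsplit : cs.takeWhile (fun c => !pvSpecial c) ++ (c :: t) = cs := by
      rw [← h, List.takeWhile_append_dropWhile]
    have hc : pvSpecial c = true := by
      have := List.head_dropWhile_not (p := fun c => !pvSpecial c) (l := cs)
      rw [h] at this
      simpa using this (by simp)
    have htk : (cs.takeWhile (fun c => !pvSpecial c)).flatMap pvTrChar
        = cs.takeWhile (fun c => !pvSpecial c) :=
      flatMap_nonspecial _ (by
        intro x hx
        have := List.mem_takeWhile_imp hx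
        simpa using this)
    calc cs.takeWhile (fun c => !pvSpecial c) ++ pvRepl c ++ pvFixKeyChars t
        = cs.takeWhile (fun c => !pvSpecial c) ++ pvRepl c ++ t.flatMap pvTrChar := by rw [ih]
      _ = (cs.takeWhile (fun c => !pvSpecial c) ++ (c :: t)).flatMap pvTrChar := by
            rw [List.flatMap_append, List.flatMap_cons, htk, pvTrChar, hc]
            simp
      _ = cs.flatMap pvTrChar := by rw [hsplit]

lemma fixKey_eq (k : String) : pvFixKeyA k = pvFixKeyB k := by
  rw [fixKeyA_eq, pvFixKeyB, fixKeyChars_eq]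

-- ===== VERDICT (by name: the statement is the Claim_ definition above) =====
theorem FixDictionary_spec : Claim_equal_FixDictionary := by
  intro Dictionary _
  unfold Spec_FixDictionary FixDictionary FixDictionary_alt
  simp [fixKey_eq]
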